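-- pv_equiv track=rewrite | github.com/pay-me-for-the-lab/AOIS-2023-1sem | LAB3/main.py | delete_row
-- ===== SOURCE A (Python) =====
-- def delete_row(table):
--     for i in table:
--         actual_table = table[:]
--         actual_table.remove(i)
--         amount_implicats = count_implicats(actual_table)
--         if len(amount_implicats) == len(table[0]):
--             return find_index(table, i)
--     return None
--
-- def count_implicats(table):
--     answer = {}
--     for j in table:
--         for k in range(len(j)):
--             if k not in answer and j[k] == '+':
--                 answer[k] = 1
--             elif k in answer and j[k] == '+':
--                 answer[k] += 1
--     return answer
--
-- def find_index(table, row):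
--     return table.index(row)
-- ===== SOURCE B (Python) =====
-- def delete_row(table):
--     if not table:
--         return None
--     width = 0
--     for r in table:
--         width = max(width, len(r))
--     cnt = [sum(1 for r in table if k < len(r) and r[k] == '+') for k in range(width)]
--     target = len(table[0])
--     for idx, r in enumerate(table):
--         covered = sum(1 for k in range(width)
--                       if cnt[k] > (1 if k < len(r) and r[k] == '+' else 0))
--         if covered == target:
--             return idx
--     return None
-- ===== Notes on version B (the rewrite author's own statement) =====
-- stated objective: faster
-- what changed: Instead of rebuilding the table without each row and recounting all '+' columns per candidate (A), B precomputes per-column '+' counts once and tests each row by checking how many columns stay covered after subtracting that row's own '+' marks.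
import Mathlib
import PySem

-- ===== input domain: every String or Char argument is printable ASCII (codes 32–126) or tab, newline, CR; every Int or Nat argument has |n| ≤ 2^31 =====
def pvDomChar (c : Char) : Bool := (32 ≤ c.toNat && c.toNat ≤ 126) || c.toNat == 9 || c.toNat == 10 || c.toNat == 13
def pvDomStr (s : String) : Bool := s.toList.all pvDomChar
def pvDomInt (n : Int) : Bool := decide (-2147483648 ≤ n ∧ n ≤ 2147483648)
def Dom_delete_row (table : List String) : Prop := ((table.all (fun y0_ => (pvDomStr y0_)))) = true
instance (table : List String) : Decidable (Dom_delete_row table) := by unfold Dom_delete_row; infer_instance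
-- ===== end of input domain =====

-- B replaces A's per-candidate "copy the table without the row and recount every column" pass
-- by one precomputed per-column '+' count, testing each row against those counts (objective: faster).

-- ===== PORT A =====
-- body of the inner 'for k in range(len(j))' loop of count_implicats
def pvStepA (j : String) (ans : PySem.Dict Int Int) (k : Int) : PySem.Dict Int Int :=
  if !ans.contains k && (PySem.Str.pyGet? j k == some '+') then ans.insert k 1
  else if ans.contains k && (PySem.Str.pyGet? j k == some '+') then ans.modify k 0 (· + 1)
  else ans

def count_implicats (table : List String) : PySem.Dict Int Int :=
  table.foldl (fun answer j =>
    (PySem.List.pyRange 0 (PySem.Str.len j) 1).foldl (pvStepA j) answer) PySem.Dict.empty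

def find_index (table : List String) (row : String) : Option Int :=
  (PySem.List.index? table row).map (fun n => (n : Int))

-- the 'for i in table' loop of A; the 'none' fallbacks are unreachable when the loop is
-- started on 'table' itself (i ∈ table, table ≠ []): there Python's remove / table[0] cannot raise
def pvLoopA (table : List String) : List String → Option Int
  | [] => none
  | i :: rest =>
    match PySem.List.remove? table i with
    | none => none
    | some actual =>
      match PySem.List.pyGet? table 0 with
      | none => none
      | some t0 =>
        if ((count_implicats actual).size : Int) = PySem.Str.len t0
        then find_index table i
        else pvLoopA table rest

def delete_row (table : List String) : Option Int := pvLoopA table table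

-- ===== PORT B =====
-- 'width = 0; for r in table: width = max(width, len(r))'
def pvWidth (table : List String) : Int :=
  table.foldl (fun w r => max w (PySem.Str.len r)) 0

-- 'cnt = [sum(1 for r in table if k < len(r) and r[k] == '+') for k in range(width)]'
def pvCnt (table : List String) : List Int :=
  (PySem.List.pyRange 0 (pvWidth table) 1).map (fun k =>
    ((table.filter (fun r => decide (k < PySem.Str.len r) && (PySem.Str.pyGet? r k == some '+'))).length : Int))

-- '1 if k < len(r) and r[k] == '+' else 0'
def pvInd (r : String) (k : Int) : Int :=
  if decide (k < PySem.Str.len r) && (PySem.Str.pyGet? r k == some '+') then 1 else 0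

-- 'covered = sum(1 for k in range(width) if cnt[k] > …)'
def pvCovered (width : Int) (cnt : List Int) (r : String) : Int :=
  (((PySem.List.pyRange 0 width 1).filter
      (fun k => PySem.List.pyGetD cnt k 0 > pvInd r k)).length : Int)

-- 'for idx, r in enumerate(table)'
def pvLoopB (width : Int) (cnt : List Int) (target : Int) : Int → List String → Option Int
  | _, [] => none
  | idx, r :: rest =>
    if pvCovered width cnt r = target then some idx
    else pvLoopB width cnt target (idx + 1) rest

def delete_row_alt (table : List String) : Option Int :=
  match table with
  | [] => none
  | t0 :: _ =>
    pvLoopB (pvWidth table) (pvCnt table) (PySem.Str.len t0) 0 table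

-- ===== PRECONDITION & SPEC =====
def Spec_delete_row (table : List String) (out : Option Int) : Prop := out = delete_row_alt table
instance (table : List String) (out : Option Int) : Decidable (Spec_delete_row table out) := by unfold Spec_delete_row; infer_instance

-- ===== CLAIM (what is proved, stated in full; the proofs are below) =====
def Claim_equal_delete_row : Prop := ∀ (table : List String), Dom_delete_row table → Spec_delete_row table (delete_row table)

-- ===== LEMMAS AND PROOFS =====

-- '+' at (Nat) column m of row j
def pvAt (j : String) (m : Nat) : Bool := j.toList[m]? == some '+'
-- number of rows of T with a '+' in column m
def pvCC (T : List String) (m : Nat) : Nat := T.countP (fun j => pvAt j m)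

-- membership in the keys of one pvStepA step
theorem pv_keys_stepA (j : String) (d : PySem.Dict Int Int) (k k' : Int) :
    k' ∈ (pvStepA j d k).keys ↔ k' ∈ d.keys ∨ (k' = k ∧ PySem.Str.pyGet? j k = some '+') := by
  simp only [pvStepA, PySem.Str.pyGet?, PySem.Chars.pyGet?]
  by_cases hc : d.contains k = true <;> by_cases hp : PySem.List.pyGet? j.toList k = some '+' <;>
    simp [hc, hp, PySem.Dict.mem_keys_insert, PySem.Dict.keys_modify]
  · have := (PySem.Dict.contains_iff_mem_keys d k).mp hc
    tauto
  · tauto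

theorem pv_nodup_stepA (j : String) (d : PySem.Dict Int Int) (k : Int)
    (h : d.keys.Nodup) : (pvStepA j d k).keys.Nodup := by
  unfold pvStepA
  split_ifs with h1 h2
  · exact PySem.Dict.nodup_keys_insert d k 1 h
  · rw [PySem.Dict.keys_modify]
    exact PySem.Dict.nodup_keys_insert d k _ h
  · exact h

-- membership in the keys after the whole inner loop over a row j
theorem pv_keys_foldl_stepA (j : String) (ks : List Int) : ∀ (d : PySem.Dict Int Int) (k' : Int),
    k' ∈ (ks.foldl (pvStepA j) d).keys ↔
      k' ∈ d.keys ∨ (k' ∈ ks ∧ PySem.Str.pyGet? j k' = some '+') := by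
  induction ks with
  | nil => simp
  | cons k t ih =>
    intro d k'
    rw [List.foldl_cons, ih, pv_keys_stepA]
    constructor
    · rintro (⟨h | ⟨rfl, hp⟩⟩ | ⟨hm, hp⟩)
      · exact Or.inl h
      · exact Or.inr ⟨List.mem_cons_self, hp⟩
      · exact Or.inr ⟨List.mem_cons_of_mem _ hm, hp⟩
    · rintro (h | ⟨hm, hp⟩)
      · exact Or.inl (Or.inl h)
      · rcases List.mem_cons.mp hm with rfl | hm
        · exact Or.inl (Or.inr ⟨rfl, hp⟩)
        · exact Or.inr ⟨hm, hp⟩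

theorem pv_nodup_foldl_stepA (j : String) (ks : List Int) : ∀ (d : PySem.Dict Int Int),
    d.keys.Nodup → (ks.foldl (pvStepA j) d).keys.Nodup := by
  induction ks with
  | nil => intro d h; simpa using h
  | cons k t ih => intro d h; exact ih _ (pv_nodup_stepA j d k h)

-- the keys of count_implicats T are exactly the '+'-columns of T
theorem pv_keys_CI (T : List String) (k' : Int) :
    k' ∈ (count_implicats T).keys ↔
      ∃ j ∈ T, 0 ≤ k' ∧ k' < PySem.Str.len j ∧ PySem.Str.pyGet? j k' = some '+' := by
  unfold count_implicats
  suffices h : ∀ (d : PySem.Dict Int Int),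
      k' ∈ (T.foldl (fun answer j => (PySem.List.pyRange 0 (PySem.Str.len j) 1).foldl (pvStepA j) answer) d).keys ↔
        k' ∈ d.keys ∨ ∃ j ∈ T, 0 ≤ k' ∧ k' < PySem.Str.len j ∧ PySem.Str.pyGet? j k' = some '+' by
    rw [h]; simp [PySem.Dict.keys_empty]
  induction T with
  | nil => simp
  | cons r t ih =>
    intro d
    rw [List.foldl_cons, ih, pv_keys_foldl_stepA, PySem.List.mem_pyRange_one]
    constructor
    · rintro ((h | ⟨⟨h0, hl⟩, hp⟩) | ⟨j, hj, h⟩)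
      · exact Or.inl h
      · exact Or.inr ⟨r, List.mem_cons_self, h0, hl, hp⟩
      · exact Or.inr ⟨j, List.mem_cons_of_mem _ hj, h⟩
    · rintro (h | ⟨j, hj, h⟩)
      · exact Or.inl (Or.inl h)
      · rcases List.mem_cons.mp hj with rfl | hj
        · exact Or.inl (Or.inr ⟨⟨h.1, h.2.1⟩, h.2.2⟩)
        · exact Or.inr ⟨j, hj, h⟩

theorem pv_nodup_CI (T : List String) : (count_implicats T).keys.Nodup := by
  unfold count_implicats
  suffices h : ∀ (d : PySem.Dict Int Int), d.keys.Nodup →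
      (T.foldl (fun answer j => (PySem.List.pyRange 0 (PySem.Str.len j) 1).foldl (pvStepA j) answer) d).keys.Nodup by
    exact h _ (by simp [PySem.Dict.keys_empty])
  induction T with
  | nil => intro d h; simpa using h
  | cons r t ih => intro d h; exact ih _ (pv_nodup_foldl_stepA r _ _ h)

-- B's per-cell test is pvAt, in Prop and Bool form
theorem pv_at_iff (j : String) (m : Nat) :
    ((decide ((m : Int) < PySem.Str.len j) && (PySem.Str.pyGet? j (m : Int) == some '+')) = true) ↔ pvAt j m = true := by
  simp only [pvAt, PySem.Str.pyGet?, PySem.Chars.pyGet?, PySem.List.pyGet?_natCast,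
    PySem.Str.len_eq, Bool.and_eq_true, decide_eq_true_eq, beq_iff_eq]
  constructor
  · rintro ⟨-, h⟩; exact h
  · intro h
    obtain ⟨hlt, -⟩ := List.getElem?_eq_some_iff.mp h
    exact ⟨by exact_mod_cast hlt, h⟩

theorem pv_at_eq (j : String) (m : Nat) :
    (decide ((m : Int) < PySem.Str.len j) && (PySem.Str.pyGet? j (m : Int) == some '+')) = pvAt j m := by
  rw [Bool.eq_iff_iff]; exact pv_at_iff j m

-- the dict size is the number of columns of T that carry a '+'
theorem pv_size_CI (T : List String) (W : Nat) (hW : ∀ j ∈ T, j.toList.length ≤ W) :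
    (count_implicats T).size = ((List.range W).filter (fun m => 0 < pvCC T m)).length := by
  rw [show (count_implicats T).size = (count_implicats T).keys.length from by
    simp [PySem.Dict.size, PySem.Dict.keys]]
  have hperm : (count_implicats T).keys.Perm
      (((List.range W).filter (fun m => 0 < pvCC T m)).map (Nat.cast : Nat → Int)) := by
    rw [List.perm_ext_iff_of_nodup (pv_nodup_CI T)
      ((List.nodup_range.filter _).map (fun a b h => Int.natCast_inj.mp h))]
    intro k
    rw [pv_keys_CI]
    simp only [List.mem_map, List.mem_filter, List.mem_range, decide_eq_true_eq]
    constructor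
    · rintro ⟨j, hj, h0, hl, hp⟩
      have hlen : k < (j.toList.length : Int) := by rw [PySem.Str.len_eq] at hl; exact hl
      refine ⟨k.toNat, ⟨?_, ?_⟩, by omega⟩
      · have := hW j hj; omega
      · rw [pvCC, List.countP_pos_iff]
        refine ⟨j, hj, ?_⟩
        have : PySem.Str.pyGet? j ((k.toNat : Nat) : Int) = some '+' := by
          rwa [show ((k.toNat : Nat) : Int) = k by omega]
        rw [PySem.Str.pyGet?, PySem.Chars.pyGet?, PySem.List.pyGet?_natCast] at this
        simp [pvAt, this]
    · rintro ⟨m, ⟨hmW, hcc⟩, rfl⟩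
      rw [pvCC, List.countP_pos_iff] at hcc
      obtain ⟨j, hj, hp⟩ := hcc
      simp only [pvAt, beq_iff_eq] at hp
      obtain ⟨hlt, -⟩ := List.getElem?_eq_some_iff.mp hp
      refine ⟨j, hj, by positivity, ?_, ?_⟩
      · rw [PySem.Str.len_eq]; exact_mod_cast hlt
      · rw [PySem.Str.pyGet?, PySem.Chars.pyGet?, PySem.List.pyGet?_natCast]; exact hp
  rw [hperm.length_eq, List.length_map]

-- B's covered count for row i equals A's dict size for the table without (one copy of) i
theorem pv_covered_eq (table : List String) (i : String) (hi : i ∈ table) :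
    pvCovered (pvWidth table) (pvCnt table) i = ((count_implicats (table.erase i)).size : Int) := by
  have h0w : (0:Int) ≤ pvWidth table := (PySem.List.le_foldl_max_int table PySem.Str.len 0).1
  have hbw : ∀ r ∈ table, PySem.Str.len r ≤ pvWidth table :=
    (PySem.List.le_foldl_max_int table PySem.Str.len 0).2
  set W : Nat := (pvWidth table).toNat with hWdef
  have hWlen : ∀ j ∈ table, j.toList.length ≤ W := by
    intro j hj
    have := hbw j hj
    rw [PySem.Str.len_eq] at this
    omega
  -- cnt lookups are the full-table column counts
  have hcnt : ∀ m : Nat, m < W →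
      PySem.List.pyGetD (pvCnt table) (m : Int) 0 = (pvCC table m : Int) := by
    intro m hm
    rw [pvCnt, PySem.List.pyGetD_map_pyRange_of_nonneg _ _ _ _ (by positivity) (by omega)]
    have hfc : table.filter (fun r => decide ((m:Int) < PySem.Str.len r) && (PySem.Str.pyGet? r (m:Int) == some '+'))
        = table.filter (fun j => pvAt j m) := by
      apply List.filter_congr
      intro x _
      exact pv_at_eq x m
    rw [hfc, pvCC, List.countP_eq_length_filter]
  -- removing one copy of i subtracts i's own indicator from each column count
  have hsplit : ∀ m : Nat, pvCC table m = pvCC (table.erase i) m + (if pvAt i m then 1 else 0) := by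
    intro m
    rw [pvCC, pvCC, (List.perm_cons_erase hi).countP_eq, List.countP_cons]
  rw [pvCovered, pv_size_CI (table.erase i) W (fun j hj => hWlen j (List.mem_of_mem_erase hj))]
  rw [show PySem.List.pyRange 0 (pvWidth table) 1 = (List.range W).map (Nat.cast : Nat → Int) from by
    rw [PySem.List.pyRange_zero]]
  rw [List.filter_map, List.length_map]
  congr 2
  apply List.filter_congr
  intro m hm
  rw [List.mem_range] at hm
  simp only [Function.comp]
  rw [hcnt m hm]
  have hind : pvInd i (m : Int) = (if pvAt i m then (1:Int) else 0) := by
    rw [pvInd, pv_at_eq]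
  rw [hind, hsplit m]
  by_cases h : pvAt i m = true <;> simp [h]

-- both loops scan the rows in order and stop at the same first row, returning its index
theorem pv_loops (table : List String) (t0 : String)
    (h0 : PySem.List.pyGet? table 0 = some t0) :
    ∀ (l₂ l₁ : List String), table = l₁ ++ l₂ →
      (∀ x ∈ l₁, pvCovered (pvWidth table) (pvCnt table) x ≠ PySem.Str.len t0) →
      pvLoopA table l₂ = pvLoopB (pvWidth table) (pvCnt table) (PySem.Str.len t0) (l₁.length : Int) l₂ := by
  intro l₂
  induction l₂ with
  | nil => intro l₁ _ _; rfl
  | cons i rest ih =>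
    intro l₁ hsplit hfail
    have hi : i ∈ table := by rw [hsplit]; simp
    rw [pvLoopA, pvLoopB, PySem.List.remove?_eq_some_erase table i hi, h0]
    dsimp only
    rw [show ((count_implicats (table.erase i)).size : Int) = pvCovered (pvWidth table) (pvCnt table) i from
      (pv_covered_eq table i hi).symm]
    by_cases hc : pvCovered (pvWidth table) (pvCnt table) i = PySem.Str.len t0
    · simp only [hc, if_true]
      rw [find_index]
      have hnot : i ∉ l₁ := fun hmem => hfail i hmem hc
      have : PySem.List.index? table i = some l₁.length :=
        (PySem.List.index?_eq_some_iff table i l₁.length).mpr ⟨l₁, rest, hsplit, rfl, hnot⟩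
      rw [this]; rfl
    · simp only [if_neg hc]
      have := ih (l₁ ++ [i]) (by rw [hsplit]; simp) (by
        intro x hx
        rcases List.mem_append.mp hx with hx | hx
        · exact hfail x hx
        · rcases List.mem_singleton.mp hx with rfl; exact hc)
      rw [this]
      congr 1
      simp

-- ===== VERDICT (by name: the statement is the Claim_ definition above) =====
theorem delete_row_spec : Claim_equal_delete_row := by
  intro table _
  unfold Spec_delete_row delete_row delete_row_alt
  match table with
  | [] => rfl
  | t0 :: tl =>
    have h0 : PySem.List.pyGet? (t0 :: tl) 0 = some t0 := by
      simp
    simpa using pv_loops (t0 :: tl) t0 h0 (t0 :: tl) [] rfl (by simp)
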